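-- pv_equiv track=rewrite | github.com/vnasta/kiren-chess-dashboard | regular_rating_cache.py | is_regular_time_control
-- ===== SOURCE A (Python) =====
-- def is_regular_time_control(tournament_name: str, section: str = "") -> bool:
--     """Determine if tournament uses regular/classical time control"""
--     tournament_lower = tournament_name.lower()
--     section_lower = section.lower()
--
--     # Indicators of NON-regular time controls
--     fast_indicators = [
--         'blitz', 'rapid', 'quick', 'speed', 'action', 'bullet',
--         'lightning', 'fast', '15+', '30+', 'g/15', 'g/30', 'g/60'
--     ]
--
--     # Check if it's a fast time control tournament
--     for indicator in fast_indicators: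
--         if indicator in tournament_lower or indicator in section_lower:
--             return False
--
--     # Indicators of regular time controls
--     regular_indicators = [
--         'classical', 'standard', 'regular', 'open', 'championship',
--         'invitational', 'masters', 'international', 'national'
--     ]
--
--     # If explicitly regular, return True
--     for indicator in regular_indicators:
--         if indicator in tournament_lower:
--             return True
--
--     # Default assumption: if no fast indicators, likely regular
--     return True
-- ===== SOURCE B (Python) =====
-- _FAST = frozenset(('blitz', 'rapid', 'quick', 'speed', 'action', 'bullet',
--                    'lightning', 'fast', '15+', '30+', 'g/15', 'g/30', 'g/60'))
-- _LENS = sorted({len(p) for p in _FAST})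
--
--
-- def _mentions_fast(text):
--     """Collect every window of a keyword length and test that window set
--     against the keyword set (hash lookup instead of per-keyword search)."""
--     windows = {text[i:i + n] for n in _LENS for i in range(len(text) - n + 1)}
--     return not _FAST.isdisjoint(windows)
--
--
-- def is_regular_time_control(tournament_name: str, section: str = "") -> bool:
--     return not (_mentions_fast(tournament_name.lower()) or
--                 _mentions_fast(section.lower()))
-- ===== Notes on version B (the rewrite author's own statement) =====
-- stated objective: alternative
-- what changed: B drops the dead regular-indicator pass and inverts the search: instead of scanning the text once per keyword, it builds the hash set of all text windows of keyword lengths and tests it for intersection with the keyword set.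
import Mathlib
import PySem

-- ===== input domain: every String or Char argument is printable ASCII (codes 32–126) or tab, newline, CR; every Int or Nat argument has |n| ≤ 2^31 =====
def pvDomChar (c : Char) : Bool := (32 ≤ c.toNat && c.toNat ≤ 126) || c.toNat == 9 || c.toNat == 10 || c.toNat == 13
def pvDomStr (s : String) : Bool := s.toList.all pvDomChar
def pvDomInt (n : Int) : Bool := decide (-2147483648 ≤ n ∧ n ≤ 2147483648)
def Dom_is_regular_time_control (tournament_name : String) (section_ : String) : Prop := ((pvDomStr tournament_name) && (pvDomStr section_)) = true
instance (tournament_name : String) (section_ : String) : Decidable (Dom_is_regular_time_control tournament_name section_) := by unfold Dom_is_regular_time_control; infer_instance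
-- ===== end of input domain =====

-- B: drops the dead regular-indicator pass and inverts the search — instead of scanning
-- the text once per keyword, it collects the set of all text windows of keyword lengths
-- and tests that set for intersection with the keyword set.

-- ===== PORT A =====
def fastIndicators : List String :=
  ["blitz", "rapid", "quick", "speed", "action", "bullet",
   "lightning", "fast", "15+", "30+", "g/15", "g/30", "g/60"]

def regularIndicators : List String :=
  ["classical", "standard", "regular", "open", "championship",
   "invitational", "masters", "international", "national"]

def is_regular_time_control (tournament_name : String) (section_ : String) : Bool :=
  let tournament_lower := PySem.Str.lower tournament_name
  let section_lower := PySem.Str.lower section_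
  -- first loop: return False on the first fast indicator found
  if fastIndicators.any (fun ind =>
      PySem.Str.isIn ind tournament_lower || PySem.Str.isIn ind section_lower) then
    false
  -- second loop: return True on the first regular indicator found
  else if regularIndicators.any (fun ind => PySem.Str.isIn ind tournament_lower) then
    true
  else
    true

-- ===== PORT B =====
-- _FAST: the keyword set (frozenset → PySem.Set)
def fastKeywords : PySem.Set (List Char) :=
  PySem.Set.ofList
    (["blitz", "rapid", "quick", "speed", "action", "bullet",
      "lightning", "fast", "15+", "30+", "g/15", "g/30", "g/60"].map String.toList)

-- _LENS = sorted({len(p) for p in _FAST})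
def keywordLens : List Nat :=
  PySem.List.sorted (PySem.Set.ofList (fastKeywords.map List.length)) (fun x => x) false

-- {text[i:i+n] for n in _LENS for i in range(len(text)-n+1)}
-- (range(len(text)-n+1) is empty when len(text)-n+1 ≤ 0; Nat 'len+1-n' clips likewise)
def windowsOf (text : List Char) : PySem.Set (List Char) :=
  PySem.Set.ofList
    (keywordLens.flatMap (fun n =>
      (List.range (text.length + 1 - n)).map (fun i => (text.drop i).take n)))

-- not _FAST.isdisjoint(windows)
def mentionsFast (text : List Char) : Bool :=
  !(PySem.Set.isdisjoint fastKeywords (windowsOf text))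

def is_regular_time_control_alt (tournament_name : String) (section_ : String) : Bool :=
  !(mentionsFast (PySem.Str.lower tournament_name).toList ||
    mentionsFast (PySem.Str.lower section_).toList)

-- ===== PRECONDITION & SPEC =====
def Spec_is_regular_time_control (tournament_name : String) (section_ : String) (out : Bool) : Prop := out = is_regular_time_control_alt tournament_name section_
instance (tournament_name : String) (section_ : String) (out : Bool) : Decidable (Spec_is_regular_time_control tournament_name section_ out) := by unfold Spec_is_regular_time_control; infer_instance

-- ===== CLAIM (what is proved, stated in full; the proofs are below) =====
def Claim_equal_is_regular_time_control : Prop := ∀ (tournament_name : String) (section_ : String), Dom_is_regular_time_control tournament_name section_ → Spec_is_regular_time_control tournament_name section_ (is_regular_time_control tournament_name section_)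

-- ===== LEMMAS AND PROOFS =====
-- every keyword's length is listed in keywordLens
lemma length_mem_keywordLens : ∀ p ∈ fastKeywords, p.length ∈ keywordLens := by decide

-- a window of the text at a keyword length is exactly an infix of that length
lemma mem_windowsOf_iff {p l : List Char} (hlen : p.length ∈ keywordLens) :
    p ∈ windowsOf l ↔ p <:+: l := by
  rw [windowsOf, PySem.Set.mem_ofList, List.mem_flatMap]
  constructor
  · rintro ⟨n, -, hmem⟩
    rw [List.mem_map] at hmem
    obtain ⟨i, -, rfl⟩ := hmem
    exact ((l.drop i).take_prefix n).isInfix.trans (l.drop_suffix i).isInfix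
  · rintro ⟨s, t, rfl⟩
    refine ⟨p.length, hlen, ?_⟩
    rw [List.mem_map]
    refine ⟨s.length, ?_, ?_⟩
    · rw [List.mem_range]
      simp [List.length_append]
      omega
    · rw [List.append_assoc, List.drop_left, List.take_left]

-- the window-set intersection test agrees with the per-keyword substring scan of A
lemma mentionsFast_eq (l : List Char) :
    mentionsFast l = fastIndicators.any (fun p => PySem.Chars.isIn p.toList l) := by
  rw [Bool.eq_iff_iff, mentionsFast, Bool.not_eq_eq_eq_not, Bool.not_true,
    Bool.eq_false_iff, ne_eq, PySem.Set.isdisjoint_iff, List.any_eq_true]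
  constructor
  · intro h
    simp only [not_forall] at h
    obtain ⟨p, hp, hw⟩ := h
    rw [not_not, mem_windowsOf_iff (length_mem_keywordLens p hp)] at hw
    have hp' : p ∈ fastIndicators.map String.toList := (PySem.Set.mem_ofList _ _).mp hp
    rw [List.mem_map] at hp'
    obtain ⟨q, hq, rfl⟩ := hp'
    exact ⟨q, hq, (PySem.Chars.isIn_iff_infix _ _).mpr hw⟩
  · rintro ⟨q, hq, hin⟩
    intro hall
    have hp : q.toList ∈ fastKeywords :=
      (PySem.Set.mem_ofList _ _).mpr (List.mem_map_of_mem hq)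
    exact hall q.toList hp
      ((mem_windowsOf_iff (length_mem_keywordLens _ hp)).mpr
        ((PySem.Chars.isIn_iff_infix _ _).mp hin))

lemma any_or' {α} (l : List α) (p q : α → Bool) :
    l.any (fun x => p x || q x) = (l.any p || l.any q) := by
  induction l with
  | nil => rfl
  | cons a t ih => simp only [List.any_cons, ih]; cases p a <;> cases q a <;> simp

-- ===== VERDICT (by name: the statement is the Claim_ definition above) =====
theorem is_regular_time_control_spec : Claim_equal_is_regular_time_control := by
  intro t s _
  unfold Spec_is_regular_time_control is_regular_time_control is_regular_time_control_alt
  simp only [PySem.Str.isIn_eq, mentionsFast_eq, any_or']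
  split_ifs with h h2 <;> first
      | (rw [h]; rfl)
      | (rw [Bool.not_eq_true] at h; rw [h]; rfl)
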